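-- pv_equiv track=rewrite | github.com/AravindVasudev/wordle-bot | wordle_bot/stat.py | generateVowelTable
-- ===== SOURCE A (Python) =====
-- from typing import List, Set
--
-- VOWELS: Set[str] = {"a", "e", "i", "o", "u"}
--
-- def wordsWithoutVowels(wordList: List[str]) -> int:
--     """Returns the count of words without vowels in them."""
--     return sum(all(char not in VOWELS for char in word) for word in wordList)
--
-- def wordsWithChar(wordList: List[str], char: str) -> int:
--     """Returns the counts with words with the given character."""
--     return sum(char in word for word in wordList)
--
-- def generateVowelTable(wordList: List[str]) -> List[tuple[str, str, int]]:
--     """Generates a tables of words with vowels count."""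
--     vowelTable = []
--     vowelTable.append(("", "Words without vowels", wordsWithoutVowels(wordList)))
--     for vowel in VOWELS:
--         vowelTable.append(
--             (vowel, f"Words with '{vowel}'", wordsWithChar(wordList, vowel))
--         )
--
--     return vowelTable
-- ===== SOURCE B (Python) =====
-- def generateVowelTable(wordList):
--     """Single pass over wordList: per-vowel counts and the no-vowel count at once."""
--     VOWELS = {"a", "e", "i", "o", "u"}
--     counts = {}
--     noVowel = 0
--     for word in wordList:
--         present = set(word) & VOWELS
--         for v in present:
--             counts[v] = counts.get(v, 0) + 1
--         if not present:
--             noVowel += 1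
--     return [("", "Words without vowels", noVowel)] + [
--         (vowel, f"Words with '{vowel}'", counts.get(vowel, 0)) for vowel in VOWELS
--     ]
-- ===== Notes on version B (the rewrite author's own statement) =====
-- stated objective: alternative
-- what changed: B makes one pass over wordList, accumulating a per-vowel counter dict and a no-vowel counter simultaneously, instead of A's six separate full scans (one per vowel plus one for vowel-free words); measured ~1.5x at large sizes but just under the confirmation bar, so no speed is claimed.
import Mathlib
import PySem

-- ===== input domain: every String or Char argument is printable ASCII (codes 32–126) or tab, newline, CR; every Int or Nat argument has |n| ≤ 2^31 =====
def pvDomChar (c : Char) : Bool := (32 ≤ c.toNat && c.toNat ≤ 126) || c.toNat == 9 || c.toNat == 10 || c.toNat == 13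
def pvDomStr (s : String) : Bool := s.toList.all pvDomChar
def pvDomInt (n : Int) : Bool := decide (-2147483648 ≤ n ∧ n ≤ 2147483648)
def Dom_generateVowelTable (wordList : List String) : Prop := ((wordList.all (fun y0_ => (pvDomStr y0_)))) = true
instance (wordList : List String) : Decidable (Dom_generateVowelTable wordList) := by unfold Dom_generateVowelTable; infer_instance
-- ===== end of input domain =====

-- B replaces A's six full scans of wordList (one per vowel, one for vowel-free words) by a
-- single pass that accumulates a per-vowel counter dict and a no-vowel counter together.
-- Both ports fix the iteration order of the Python set literal {"a","e","i","o","u"} to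
-- u, a, o, e, i — its order under the pinned PYTHONHASHSEED=0 the checks run with.
-- Vowels are single characters, so membership of a vowel in the set / in a word is modelled
-- exactly as Char membership (a 1-char substring test equals a char test).

-- ===== PORT A =====
def pvVOWELS : List Char := ['u', 'a', 'o', 'e', 'i']

def wordsWithoutVowels (wordList : List String) : Int :=
  (wordList.map (fun word =>
    if word.toList.all (fun c => !pvVOWELS.contains c) then (1 : Int) else 0)).sum

def wordsWithChar (wordList : List String) (ch : Char) : Int :=
  (wordList.map (fun word => if word.toList.contains ch then (1 : Int) else 0)).sum

def generateVowelTable (wordList : List String) : List (String × String × Int) :=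
  -- vowelTable = []; append(("", …, wordsWithoutVowels …)); for vowel in VOWELS: append(…)
  pvVOWELS.foldl
    (fun t v => t ++ [(v.toString, "Words with '" ++ v.toString ++ "'", wordsWithChar wordList v)])
    [("", "Words without vowels", wordsWithoutVowels wordList)]

-- ===== PORT B =====
def pvStepB (st : PySem.Dict Char Int × Int) (word : String) : PySem.Dict Char Int × Int :=
  let present := pvVOWELS.filter (fun v => word.toList.contains v)  -- set(word) & VOWELS
  let counts := present.foldl (fun d v => d.insert v (d.getD v 0 + 1)) st.1
  (counts, if present.isEmpty then st.2 + 1 else st.2)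

def generateVowelTable_alt (wordList : List String) : List (String × String × Int) :=
  let st := wordList.foldl pvStepB (PySem.Dict.empty, 0)
  ("", "Words without vowels", st.2) ::
    pvVOWELS.map (fun v =>
      (v.toString, "Words with '" ++ v.toString ++ "'", st.1.getD v 0))

-- ===== PRECONDITION & SPEC =====
def Spec_generateVowelTable (wordList : List String) (out : List (String × String × Int)) : Prop := out = generateVowelTable_alt wordList
instance (wordList : List String) (out : List (String × String × Int)) : Decidable (Spec_generateVowelTable wordList out) := by unfold Spec_generateVowelTable; infer_instance

-- ===== CLAIM =====
def Claim_equal_generateVowelTable : Prop := ∀ (wordList : List String), Dom_generateVowelTable wordList → Spec_generateVowelTable wordList (generateVowelTable wordList)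

-- ===== LEMMAS AND PROOFS =====
-- the append-loop of port A builds head-then-map
theorem pv_foldl_append (l : List Char) (f : Char → (String × String × Int)) (init : List (String × String × Int)) :
    l.foldl (fun t v => t ++ [f v]) init = init ++ l.map f := by
  induction l generalizing init with
  | nil => simp
  | cons a l ih => simp [List.foldl_cons, ih, List.append_assoc]

-- B's no-vowel test (no vowel occurs in the word) equals A's (every char is a non-vowel)
theorem pv_empty_iff (word : String) :
    (pvVOWELS.filter (fun v => word.toList.contains v)).isEmpty
      = word.toList.all (fun c => !pvVOWELS.contains c) := by
  rw [Bool.eq_iff_iff]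
  simp only [List.isEmpty_iff, List.filter_eq_nil_iff, List.all_eq_true, List.contains_eq_mem,
    Bool.not_eq_true', decide_eq_false_iff_not, decide_eq_true_eq]
  exact ⟨fun h c hc hm => h _ hm hc, fun h v hv hm => h _ hm hv⟩

-- second component of the fold: the running no-vowel count
theorem pv_fold_snd (l : List String) (d : PySem.Dict Char Int) (n : Int) :
    (l.foldl pvStepB (d, n)).2 = n + wordsWithoutVowels l := by
  induction l generalizing d n with
  | nil => simp [wordsWithoutVowels]
  | cons w l ih =>
    simp only [List.foldl_cons, wordsWithoutVowels, List.map_cons, List.sum_cons]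
    rw [ih]
    show (if (pvVOWELS.filter (fun v => w.toList.contains v)).isEmpty then n + 1 else n)
        + wordsWithoutVowels l = _
    rw [pv_empty_iff]
    unfold wordsWithoutVowels
    split_ifs <;> ring

-- first component of the fold: the running per-vowel counts
theorem pv_fold_getD (l : List String) (d : PySem.Dict Char Int) (n : Int) (v : Char)
    (hv : v ∈ pvVOWELS) :
    ((l.foldl pvStepB (d, n)).1).getD v 0 = d.getD v 0 + wordsWithChar l v := by
  induction l generalizing d n with
  | nil => simp [wordsWithChar]
  | cons w l ih =>
    simp only [List.foldl_cons, wordsWithChar, List.map_cons, List.sum_cons]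
    rw [ih]
    show (((pvVOWELS.filter (fun u => w.toList.contains u)).foldl
            (fun d u => d.insert u (d.getD u 0 + 1)) d).getD v 0) + _ = _
    rw [PySem.Dict.getD_foldl_insert_add_one]
    have hcnt : ((pvVOWELS.filter (fun u => w.toList.contains u)).count v : Int)
        = if w.toList.contains v then (1 : Int) else 0 := by
      have h1 : pvVOWELS.count v = 1 :=
        List.count_eq_one_of_mem (by decide) hv
      split_ifs with h
      · rw [List.count_filter (by simpa using h), h1]; rfl
      · have hnm : v ∉ w.toList := by simpa [List.contains_eq_mem] using h
        rw [List.count_eq_zero.mpr (by simp [List.mem_filter, List.contains_eq_mem, hnm])]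
        rfl
    rw [hcnt]
    unfold wordsWithChar
    split_ifs <;> ring

-- ===== VERDICT (by name: the statement is the Claim_ definition above) =====
theorem generateVowelTable_spec : Claim_equal_generateVowelTable := by
  intro wordList _
  unfold Spec_generateVowelTable generateVowelTable generateVowelTable_alt
  rw [pv_foldl_append]
  simp only [List.singleton_append]
  rw [pv_fold_snd]
  refine congrArg₂ _ (by ring_nf) ?_
  refine List.map_congr_left ?_
  intro v hv
  rw [pv_fold_getD _ _ _ _ hv]
  simp
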